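-- pv_equiv track=rewrite | github.com/ZJUVAI/GenesisGeo | src/newclid/match_theorems.py | map_premises_to_points
-- ===== SOURCE A (Python) =====
-- import itertools
--
-- def map_premises_to_points(premises, points):
--     result = []
--     premise_points = []
--     for premise in premises:
--         # 获取premise中这些点的新点（在point中没有出现的点）
--         new_points = []
--         for p in premise[1:]:
--             if p not in premise_points:
--                 new_points.append(p)
--                 premise_points.append(p)
--         if new_points:
--             mappings =  [{v: p for v, p in zip(new_points, point_list)}
--                     for point_list in itertools.product(points, repeat=len(new_points))]
--             result.append(mappings)
--         else:
--             # 如果没有新点，返回空的映射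
--             result.append([{}])
--
--     return result
-- ===== SOURCE B (Python) =====
-- def map_premises_to_points(premises, points):
--     result = []
--     premise_points = []
--     for premise in premises:
--         new_points = []
--         for p in premise[1:]:
--             if p not in premise_points:
--                 new_points.append(p)
--                 premise_points.append(p)
--         # incremental build: extend every partial mapping by each candidate point,
--         # last-added variable varies fastest (matches product's lexicographic order)
--         mappings = [{}]
--         for v in new_points:
--             mappings = [{**m, v: p} for m in mappings for p in points]
--         result.append(mappings)
--     return result
-- ===== Notes on version B (the rewrite author's own statement) =====
-- stated objective: simpler
-- what changed: Replaces the itertools.product-over-tuples comprehension (plus the empty/non-empty branch) with an incremental fold that extends every partial dict by each candidate point, making the branch disappear.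
import Mathlib
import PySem

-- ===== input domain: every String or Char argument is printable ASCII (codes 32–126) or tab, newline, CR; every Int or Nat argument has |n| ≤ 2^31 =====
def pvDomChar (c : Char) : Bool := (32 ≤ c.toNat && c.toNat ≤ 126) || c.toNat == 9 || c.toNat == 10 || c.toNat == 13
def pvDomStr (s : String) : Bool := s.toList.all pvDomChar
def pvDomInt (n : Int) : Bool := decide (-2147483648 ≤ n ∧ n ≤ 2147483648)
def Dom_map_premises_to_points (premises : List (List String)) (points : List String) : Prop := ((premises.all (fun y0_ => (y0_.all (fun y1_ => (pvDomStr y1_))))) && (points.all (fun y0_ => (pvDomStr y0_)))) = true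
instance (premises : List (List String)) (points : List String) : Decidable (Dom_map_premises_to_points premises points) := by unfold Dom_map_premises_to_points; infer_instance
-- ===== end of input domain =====

-- B replaces A's itertools.product comprehension (and its empty/non-empty branch) by an
-- incremental fold extending partial mappings point by point; objective: simpler (no speed claim).


-- ===== PORT A =====
-- itertools.product(points, repeat=k): first coordinate varies slowest (CPython order)
def pvProdRep (points : List String) : Nat → List (List String)
  | 0 => [[]]
  | k+1 => points.flatMap (fun p => (pvProdRep points k).map (p :: ·))

-- {v: p for v, p in pairs}
def pvDictOf (pairs : List (String × String)) : PySem.Dict String String :=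
  pairs.foldl (fun d vp => d.insert vp.1 vp.2) PySem.Dict.empty

-- the inner 'new_points' loop, identical in A and B: state = (new_points, premise_points)
def pvNewPoints (premise : List String) (premise_points : List String) :
    List String × List String :=
  (PySem.List.slice premise (some 1) none).foldl
    (fun (s : List String × List String) p =>
      if p ∈ s.2 then s else (s.1 ++ [p], s.2 ++ [p]))
    ([], premise_points)

-- one iteration of A's outer loop
def pvStepA (points : List String)
    (st : List (List (List (String × String))) × List String) (premise : List String) :
    List (List (List (String × String))) × List String :=
  let np := pvNewPoints premise st.2
  if np.1.isEmpty = false then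
    (st.1 ++ [(pvProdRep points np.1.length).map
                (fun pl => (pvDictOf (np.1.zip pl)).items)], np.2)
  else
    (st.1 ++ [[(PySem.Dict.empty : PySem.Dict String String).items]], np.2)

def map_premises_to_points (premises : List (List String)) (points : List String) :
    List (List (List (String × String))) :=
  (premises.foldl (pvStepA points) ([], [])).1

-- ===== PORT B =====
-- one iteration of B's outer loop: mappings built incrementally over new_points
def pvStepB (points : List String)
    (st : List (List (List (String × String))) × List String) (premise : List String) :
    List (List (List (String × String))) × List String :=
  let np := pvNewPoints premise st.2
  let mappings := np.1.foldl
    (fun (ms : List (PySem.Dict String String)) v =>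
      ms.flatMap (fun m => points.map (fun p => m.insert v p)))
    [PySem.Dict.empty]
  (st.1 ++ [mappings.map (·.items)], np.2)

def map_premises_to_points_alt (premises : List (List String)) (points : List String) :
    List (List (List (String × String))) :=
  (premises.foldl (pvStepB points) ([], [])).1

-- ===== PRECONDITION & SPEC =====
def Spec_map_premises_to_points (premises : List (List String)) (points : List String) (out : List (List (List (String × String)))) : Prop := out = map_premises_to_points_alt premises points
instance (premises : List (List String)) (points : List String) (out : List (List (List (String × String)))) : Decidable (Spec_map_premises_to_points premises points out) := by unfold Spec_map_premises_to_points; infer_instance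

-- ===== CLAIM (what is proved, stated in full; the proofs are below) =====
def Claim_equal_map_premises_to_points : Prop := ∀ (premises : List (List String)) (points : List String), Dom_map_premises_to_points premises points → Spec_map_premises_to_points premises points (map_premises_to_points premises points)

-- ===== LEMMAS AND PROOFS =====

-- B's incremental fold, started from any pool of partial dicts, is A's product-then-zip map.
lemma pv_inner (points : List String) (vs : List String)
    (ms : List (PySem.Dict String String)) :
    vs.foldl
      (fun (ms : List (PySem.Dict String String)) v =>
        ms.flatMap (fun m => points.map (fun p => m.insert v p))) ms
    = ms.flatMap (fun d => (pvProdRep points vs.length).map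
        (fun pl => (vs.zip pl).foldl (fun d vp => d.insert vp.1 vp.2) d)) := by
  induction vs generalizing ms with
  | nil => simp [pvProdRep]
  | cons v rest ih =>
    simp only [List.foldl_cons, ih, List.length_cons, pvProdRep, List.flatMap_assoc,
      List.flatMap_map, List.map_flatMap, List.map_map]
    simp only [Function.comp_def, List.zip_cons_cons, List.foldl_cons]

-- per premise, one step of A's outer loop equals one step of B's
lemma pv_step (points : List String)
    (st : List (List (List (String × String))) × List String) (premise : List String) :
    pvStepA points st premise = pvStepB points st premise := by
  simp only [pvStepA, pvStepB]
  rw [pv_inner]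
  cases h : (pvNewPoints premise st.2).1 with
  | nil => simp [pvProdRep, PySem.Dict.empty]
  | cons v rest => simp [pvDictOf, List.map_map, Function.comp]

lemma pv_outer (points : List String) (premises : List (List String))
    (r : List (List (List (String × String)))) (pp : List String) :
    premises.foldl (pvStepA points) (r, pp) = premises.foldl (pvStepB points) (r, pp) := by
  induction premises generalizing r pp with
  | nil => rfl
  | cons premise rest ih =>
    rw [List.foldl_cons, List.foldl_cons, pv_step]
    rcases h : pvStepB points (r, pp) premise with ⟨r', pp'⟩
    exact ih r' pp'

-- ===== VERDICT (by name: the statement is the Claim_ definition above) =====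
theorem map_premises_to_points_spec : Claim_equal_map_premises_to_points := by
  intro premises points _
  unfold Spec_map_premises_to_points map_premises_to_points map_premises_to_points_alt
  rw [pv_outer]
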